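-- pv_equiv track=rewrite | github.com/juliandito/python-exercises | no7_kategori.py | kategori
-- ===== SOURCE A (Python) =====
-- def kategori(val):
--
--     flagNegative = 0
--     flagPositive = 0
--     flagZeroes = 0
--     flagEven = 0
--     flagOdd = 0
--
--
--     for i in range(0, len(val)):
--         if val[i] > 0:
--             flagPositive += 1
--             if val[i] % 2 == 0:
--                 flagEven += 1
--             else:
--                 flagOdd += 1
--
--         elif val[i] < 0:
--             flagNegative += 1
--             if val[i] % 2 == 0:
--                 flagEven += 1
--             else:
--                 flagOdd += 1
--
--         else:
--             flagZeroes += 1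
--
--     return flagNegative, flagPositive, flagZeroes, flagEven, flagOdd
-- ===== SOURCE B (Python) =====
-- def kategori(val):
--     flagNegative = sum(1 for x in val if x < 0)
--     flagPositive = sum(1 for x in val if x > 0)
--     flagZeroes = sum(1 for x in val if x == 0)
--     flagEven = sum(1 for x in val if x != 0 and x % 2 == 0)
--     flagOdd = sum(1 for x in val if x != 0 and x % 2 != 0)
--     return flagNegative, flagPositive, flagZeroes, flagEven, flagOdd
-- ===== Notes on version B (the rewrite author's own statement) =====
-- stated objective: alternative
-- what changed: Replaces A's single fused loop with mutable counters and nested sign/parity branches by five independent one-condition counting passes (generator sums), with zero explicitly excluded from the even/odd counts.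
import Mathlib
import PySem

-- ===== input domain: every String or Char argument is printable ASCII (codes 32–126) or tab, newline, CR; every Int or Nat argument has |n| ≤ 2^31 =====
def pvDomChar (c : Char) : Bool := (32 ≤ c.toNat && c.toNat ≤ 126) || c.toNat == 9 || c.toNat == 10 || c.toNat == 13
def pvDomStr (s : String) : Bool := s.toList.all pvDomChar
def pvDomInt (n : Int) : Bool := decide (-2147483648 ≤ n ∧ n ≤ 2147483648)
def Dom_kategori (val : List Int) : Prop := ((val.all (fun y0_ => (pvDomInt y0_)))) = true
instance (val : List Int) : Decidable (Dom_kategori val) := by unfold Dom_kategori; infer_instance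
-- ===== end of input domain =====

-- B replaces A's single fused loop (mutable counters, nested sign/parity branches)
-- by five independent one-condition counting passes; objective: alternative decomposition.

-- ===== PORT A =====
-- A's for-loop over indices reading val[i], carried as a fold over the elements with
-- the same five-counter state and the same branch order; Python's '% 2' via PySem.Int.mod.
def kategori (val : List Int) : Int × Int × Int × Int × Int :=
  val.foldl
    (fun (s : Int × Int × Int × Int × Int) x =>
      let (n, p, z, e, o) := s
      if x > 0 then
        if PySem.Int.mod x 2 == 0 then (n, p + 1, z, e + 1, o)
        else (n, p + 1, z, e, o + 1)
      else if x < 0 then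
        if PySem.Int.mod x 2 == 0 then (n + 1, p, z, e + 1, o)
        else (n + 1, p, z, e, o + 1)
      else (n, p, z + 1, e, o))
    (0, 0, 0, 0, 0)

-- ===== PORT B =====
-- sum(1 for x in val if pred(x)) as a count of the elements satisfying pred.
def pvCount (val : List Int) (pred : Int → Bool) : Int := ((val.countP pred : Nat) : Int)

def kategori_alt (val : List Int) : Int × Int × Int × Int × Int :=
  (pvCount val (fun x => x < 0),
   pvCount val (fun x => x > 0),
   pvCount val (fun x => x == 0),
   pvCount val (fun x => x != 0 && PySem.Int.mod x 2 == 0),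
   pvCount val (fun x => x != 0 && PySem.Int.mod x 2 != 0))

-- ===== PRECONDITION & SPEC =====
def Spec_kategori (val : List Int) (out : Int × Int × Int × Int × Int) : Prop := out = kategori_alt val
instance (val : List Int) (out : Int × Int × Int × Int × Int) : Decidable (Spec_kategori val out) := by unfold Spec_kategori; infer_instance

-- ===== CLAIM (what is proved, stated in full; the proofs are below) =====
def Claim_equal_kategori : Prop := ∀ (val : List Int), Dom_kategori val → Spec_kategori val (kategori val)

-- ===== LEMMAS AND PROOFS =====

theorem pvCount_cons (x : Int) (xs : List Int) (pred : Int → Bool) :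
    pvCount (x :: xs) pred = pvCount xs pred + (if pred x then 1 else 0) := by
  simp [pvCount, List.countP_cons]

theorem kategori_loop (val : List Int) :
    ∀ n p z e o : Int,
      val.foldl
        (fun (s : Int × Int × Int × Int × Int) x =>
          let (n, p, z, e, o) := s
          if x > 0 then
            if PySem.Int.mod x 2 == 0 then (n, p + 1, z, e + 1, o)
            else (n, p + 1, z, e, o + 1)
          else if x < 0 then
            if PySem.Int.mod x 2 == 0 then (n + 1, p, z, e + 1, o)
            else (n + 1, p, z, e, o + 1)
          else (n, p, z + 1, e, o))
        (n, p, z, e, o)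
      = (n + pvCount val (fun x => x < 0),
         p + pvCount val (fun x => x > 0),
         z + pvCount val (fun x => x == 0),
         e + pvCount val (fun x => x != 0 && PySem.Int.mod x 2 == 0),
         o + pvCount val (fun x => x != 0 && PySem.Int.mod x 2 != 0)) := by
  induction val with
  | nil => intro n p z e o; simp [pvCount]
  | cons x xs ih =>
    intro n p z e o
    simp only [List.foldl_cons, pvCount_cons]
    generalize PySem.Int.mod x 2 = m
    by_cases hx0 : x > 0
    · have hlt : ¬ x < 0 := by omega
      have hne : ¬ x = 0 := by omega
      by_cases hm : m = 0
      · rw [if_pos hx0, if_pos (by simp [hm] : (m == 0) = true), ih]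
        simp [Prod.ext_iff, hx0, hlt, hne, hm]
        omega
      · rw [if_pos hx0, if_neg (by simp [hm] : ¬ ((m == 0) = true)), ih]
        simp [Prod.ext_iff, hx0, hlt, hne, hm]
        omega
    · by_cases hxn : x < 0
      · have hne : ¬ x = 0 := by omega
        by_cases hm : m = 0
        · rw [if_neg hx0, if_pos hxn, if_pos (by simp [hm] : (m == 0) = true), ih]
          simp [Prod.ext_iff, hx0, hxn, hne, hm]
          omega
        · rw [if_neg hx0, if_pos hxn, if_neg (by simp [hm] : ¬ ((m == 0) = true)), ih]
          simp [Prod.ext_iff, hx0, hxn, hne, hm]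
          omega
      · have hz : x = 0 := by omega
        subst hz
        rw [if_neg hx0, if_neg hxn, ih]
        simp [Prod.ext_iff]
        omega

-- ===== VERDICT (by name: the statement is the Claim_ definition above) =====
theorem kategori_spec : Claim_equal_kategori := by
  intro val _
  unfold Spec_kategori kategori kategori_alt
  rw [kategori_loop]
  simp
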